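-- pv_equiv track=rewrite | github.com/nsv-format/nsv-python | benchmarks/python_vs_rust.py | generate_mixed_special_chars
-- ===== SOURCE A (Python) =====
-- from typing import List, Callable, Tuple
--
-- def generate_mixed_special_chars(rows: int, cols: int) -> List[List[str]]:
--     """Generate data with mixed special characters."""
--     patterns = [
--         "Normal text",
--         "Text with\nnewlines",
--         r"Text with \backslashes",
--         "",  # Empty cell
--         "Text with, commas, and stuff",
--         'Text with "quotes"',
--     ]
--     data = []
--     for i in range(rows):
--         row = []
--         for j in range(cols):
--             pattern = patterns[(i * cols + j) % len(patterns)]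
--             row.append(pattern)
--         data.append(row)
--     return data
-- ===== SOURCE B (Python) =====
-- def generate_mixed_special_chars(rows: int, cols: int):
--     """Generate data with mixed special characters (flat-generate then reshape)."""
--     patterns = [
--         "Normal text",
--         "Text with\nnewlines",
--         r"Text with \backslashes",
--         "",  # Empty cell
--         "Text with, commas, and stuff",
--         'Text with "quotes"',
--     ]
--     flat = [patterns[k % len(patterns)] for k in range(max(rows, 0) * max(cols, 0))]
--     return [flat[r * cols:(r + 1) * cols] for r in range(rows)]
-- ===== Notes on version B (the rewrite author's own statement) =====
-- stated objective: alternative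
-- what changed: B generates the whole flattened rows*cols pattern sequence in one linear cycling pass and then reshapes it into rows by slicing, instead of A's nested indexed row/column loops with per-cell index arithmetic.
import Mathlib
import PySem

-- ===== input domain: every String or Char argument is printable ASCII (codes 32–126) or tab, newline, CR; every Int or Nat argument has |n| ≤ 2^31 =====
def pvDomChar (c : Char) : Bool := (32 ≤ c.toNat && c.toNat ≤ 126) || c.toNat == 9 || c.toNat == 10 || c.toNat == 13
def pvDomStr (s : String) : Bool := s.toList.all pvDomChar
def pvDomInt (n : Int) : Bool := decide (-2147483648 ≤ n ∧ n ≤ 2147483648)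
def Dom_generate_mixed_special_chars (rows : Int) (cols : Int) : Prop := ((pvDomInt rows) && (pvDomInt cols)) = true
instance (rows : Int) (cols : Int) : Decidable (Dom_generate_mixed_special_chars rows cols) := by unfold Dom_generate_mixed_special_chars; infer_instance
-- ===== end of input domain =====

-- B builds the flat rows*cols cycling sequence in one pass and reshapes it by slicing,
-- instead of A's nested indexed loops; alternative decomposition, same cost.

-- ===== PORT A =====
def pvPatterns : List String :=
  ["Normal text", "Text with\nnewlines", "Text with \\backslashes", "",
   "Text with, commas, and stuff", "Text with \"quotes\""]

-- the modular index is always in [0,6), so Python's patterns[...] never raises; pyGetD's default is never used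
def generate_mixed_special_chars (rows : Int) (cols : Int) : List (List String) :=
  (PySem.List.pyRange 0 rows 1).foldl (fun data i =>
    data ++ [(PySem.List.pyRange 0 cols 1).foldl (fun row j =>
      row ++ [PySem.List.pyGetD pvPatterns (PySem.Int.mod (i * cols + j) (pvPatterns.length : Int)) ""]) []]) []

-- ===== PORT B =====
def generate_mixed_special_chars_alt (rows : Int) (cols : Int) : List (List String) :=
  let flat := (PySem.List.pyRange 0 (max rows 0 * max cols 0) 1).map
    (fun k => PySem.List.pyGetD pvPatterns (PySem.Int.mod k (pvPatterns.length : Int)) "")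
  (PySem.List.pyRange 0 rows 1).map
    (fun r => PySem.List.slice flat (some (r * cols)) (some ((r + 1) * cols)))

-- ===== PRECONDITION & SPEC =====
def Spec_generate_mixed_special_chars (rows : Int) (cols : Int) (out : List (List String)) : Prop := out = generate_mixed_special_chars_alt rows cols
instance (rows : Int) (cols : Int) (out : List (List String)) : Decidable (Spec_generate_mixed_special_chars rows cols out) := by unfold Spec_generate_mixed_special_chars; infer_instance

-- ===== CLAIM (what is proved, stated in full; the proofs are below) =====
def Claim_equal_generate_mixed_special_chars : Prop := ∀ (rows : Int) (cols : Int), Dom_generate_mixed_special_chars rows cols → Spec_generate_mixed_special_chars rows cols (generate_mixed_special_chars rows cols)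

-- ===== LEMMAS AND PROOFS =====

-- cell value, for brevity in the proofs
def pvCell (k : Int) : String :=
  PySem.List.pyGetD pvPatterns (PySem.Int.mod k (pvPatterns.length : Int)) ""

lemma pvA_eq_map (rows cols : Int) :
    generate_mixed_special_chars rows cols =
      (PySem.List.pyRange 0 rows 1).map (fun i =>
        (PySem.List.pyRange 0 cols 1).map (fun j => pvCell (i * cols + j))) := by
  unfold generate_mixed_special_chars
  rw [PySem.List.foldl_append_singleton_eq_map]
  simp only [List.nil_append]
  refine List.map_congr_left (fun i _ => ?_)
  rw [PySem.List.foldl_append_singleton_eq_map]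
  simp [pvCell]

lemma pvSlice_nil {α : Type} (a b : Option Int) : PySem.List.slice ([] : List α) a b = [] := by
  cases a <;> cases b <;> simp [PySem.List.slice]

-- the key reshaping fact: slicing row i out of the flat sequence gives row i of the grid
lemma pvSlice_row (rows cols i : Int) (hc : 0 < cols) (hi0 : 0 ≤ i) (hir : i < rows) :
    PySem.List.slice
      ((PySem.List.pyRange 0 (max rows 0 * max cols 0) 1).map pvCell)
      (some (i * cols)) (some ((i + 1) * cols)) =
      (PySem.List.pyRange 0 cols 1).map (fun j => pvCell (i * cols + j)) := by
  have h1 : (0 : Int) ≤ i * cols := mul_nonneg hi0 (le_of_lt hc)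
  have h2 : i * cols ≤ (i + 1) * cols := by nlinarith
  have hmr : max rows 0 = rows := by omega
  have hmc : max cols 0 = cols := by omega
  rw [hmr, hmc]
  have h3 : (i + 1) * cols ≤ rows * cols := by nlinarith
  rw [PySem.List.pyRange_one_append 0 (i * cols) (rows * cols) h1 (le_trans h2 h3),
      PySem.List.pyRange_one_append (i * cols) ((i + 1) * cols) (rows * cols) h2 h3]
  rw [List.map_append, List.map_append,
      PySem.List.slice_toNat _ h1 (le_trans h1 h2)]
  have hlen1 : ((PySem.List.pyRange 0 (i * cols) 1).map pvCell).length = (i * cols).toNat := by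
    simp [PySem.List.length_pyRange_one]
  rw [List.drop_left' hlen1]
  have hlen2 : ((PySem.List.pyRange (i * cols) ((i + 1) * cols) 1).map pvCell).length
      = ((i + 1) * cols).toNat - (i * cols).toNat := by
    simp [PySem.List.length_pyRange_one]
    omega
  rw [List.take_left' (by omega : (((PySem.List.pyRange (i * cols) ((i + 1) * cols) 1).map pvCell)).length = ((i + 1) * cols).toNat - (i * cols).toNat)]
  -- both sides are maps over ranges of length cols
  rw [PySem.List.pyRange_one (i * cols) ((i + 1) * cols), PySem.List.pyRange_one 0 cols]
  have : ((i + 1) * cols - i * cols) = cols := by ring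
  rw [this]
  simp [List.map_map, Function.comp]

lemma pvB_eq_map (rows cols : Int) (hc : 0 < cols) :
    generate_mixed_special_chars_alt rows cols =
      (PySem.List.pyRange 0 rows 1).map (fun i =>
        (PySem.List.pyRange 0 cols 1).map (fun j => pvCell (i * cols + j))) := by
  unfold generate_mixed_special_chars_alt
  refine List.map_congr_left (fun i hi => ?_)
  rw [PySem.List.mem_pyRange_one] at hi
  exact pvSlice_row rows cols i hc hi.1 hi.2

-- ===== VERDICT (by name: the statement is the Claim_ definition above) =====
theorem generate_mixed_special_chars_spec : Claim_equal_generate_mixed_special_chars := by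
  intro rows cols _
  unfold Spec_generate_mixed_special_chars
  by_cases hc : 0 < cols
  · rw [pvA_eq_map, pvB_eq_map rows cols hc]
  · -- cols ≤ 0: every row is empty on both sides
    have hc' : cols ≤ 0 := le_of_not_gt hc
    rw [pvA_eq_map]
    unfold generate_mixed_special_chars_alt
    have hcr : PySem.List.pyRange 0 cols 1 = [] := PySem.List.pyRange_one_eq_nil hc'
    refine List.map_congr_left (fun i hi => ?_)
    rw [PySem.List.mem_pyRange_one] at hi
    have hflat : PySem.List.pyRange 0 (max rows 0 * max cols 0) 1 = [] := by
      apply PySem.List.pyRange_one_eq_nil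
      have : max cols 0 = 0 := by omega
      simp [this]
    rw [hcr, hflat]
    simp [pvSlice_nil]
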